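-- pv_equiv track=rewrite | github.com/cirosantilli/project-euler-solvers | solvers/324.py | compute_a_terms
-- ===== SOURCE A (Python) =====
-- from typing import DefaultDict, Dict, List, Sequence, Tuple
--
-- MOD = 100000007
--
-- def compute_a_terms(num_terms: int, trans: List[List[Tuple[int, int]]]) -> List[int]:
--     """Compute a(m) = f(2m) for m=0..num_terms-1 (mod MOD) using the slice DP."""
--
--     if num_terms <= 0:
--         return []
--
--     max_slices = 2 * (num_terms - 1)
--     dp = [0] * (1 << 9)
--     dp[0] = 1
--
--     a = [1]  # a(0) = f(0) = 1
--
--     for n in range(1, max_slices + 1):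
--         nxt = [0] * (1 << 9)
--         for mask, val in enumerate(dp):
--             if not val:
--                 continue
--             for next_mask, count in trans[mask]:
--                 nxt[next_mask] = (nxt[next_mask] + val * count) % MOD
--         dp = nxt
--         if n % 2 == 0:
--             a.append(dp[0])
--
--     return a
-- ===== SOURCE B (Python) =====
-- from typing import List, Tuple
--
-- MOD = 100000007
--
-- def compute_a_terms(num_terms: int, trans: List[List[Tuple[int, int]]]) -> List[int]:
--     """Compute a(m) = f(2m) for m=0..num_terms-1 (mod MOD).
--
--     Instead of stepping one slice at a time with a parity check, compose the
--     transition table with itself once (trans2 = trans o trans, mod MOD) and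
--     apply the composed two-slice transition once per output term."""
--
--     if num_terms <= 0:
--         return []
--
--     a = [1]  # a(0) = f(0) = 1
--     if num_terms == 1:
--         return a
--
--     trans2 = []
--     for edges in trans:
--         comp = {}
--         for m1, c1 in edges:
--             for m2, c2 in trans[m1]:
--                 comp[m2] = (comp.get(m2, 0) + c1 * c2) % MOD
--         trans2.append(list(comp.items()))
--
--     dp = [0] * (1 << 9)
--     dp[0] = 1
--
--     for _ in range(1, num_terms):
--         nxt = [0] * (1 << 9)
--         for mask, val in enumerate(dp):
--             if not val:
--                 continue
--             for next_mask, count in trans2[mask]: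
--                 nxt[next_mask] = (nxt[next_mask] + val * count) % MOD
--         dp = nxt
--         a.append(dp[0])
--
--     return a
-- ===== Notes on version B (the rewrite author's own statement) =====
-- stated objective: faster
-- what changed: B composes the transition table with itself once (trans2 = trans o trans mod MOD, built via a dict per mask) and then runs a single loop of num_terms-1 two-slice steps appending dp[0] each iteration, instead of A's 2*(num_terms-1) single-slice steps with a parity check selecting the even slices.
-- outside the precondition, e.g. on compute_a_terms(2, [[(0, 1), (1, 0)]]): A returns [1, 1], B raises IndexError
import Mathlib
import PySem

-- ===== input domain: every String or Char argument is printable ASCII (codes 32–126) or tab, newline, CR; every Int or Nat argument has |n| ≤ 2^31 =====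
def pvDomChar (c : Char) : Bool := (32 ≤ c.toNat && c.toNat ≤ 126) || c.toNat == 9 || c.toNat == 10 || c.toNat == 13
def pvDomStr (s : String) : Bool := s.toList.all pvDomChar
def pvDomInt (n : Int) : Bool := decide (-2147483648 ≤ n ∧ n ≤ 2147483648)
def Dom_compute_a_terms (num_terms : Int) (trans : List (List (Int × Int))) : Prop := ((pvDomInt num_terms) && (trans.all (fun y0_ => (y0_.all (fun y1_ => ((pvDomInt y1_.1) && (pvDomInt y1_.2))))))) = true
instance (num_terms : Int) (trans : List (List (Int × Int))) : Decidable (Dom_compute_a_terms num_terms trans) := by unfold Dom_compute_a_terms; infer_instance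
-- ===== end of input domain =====

-- B replaces A's 2*(num_terms-1) single-slice DP steps (with a parity check) by one
-- composition of the transition table with itself (trans2, mod MOD) followed by
-- num_terms-1 two-slice steps: half the slice passes (measured faster in a timing run).

-- ===== PORT A =====
-- Shared helper: one application of a transition table to a dense dp slice —
-- A's inner double loop and B's main-loop body are this identical piece of Python.
def pvApply (table : List (List (Int × Int))) (dp : List Int) : List Int :=
  (PySem.List.enumerate dp 0).foldl
    (fun nxt mv =>
      if mv.2 == 0 then nxt
      else ((PySem.List.pyGet? table mv.1).getD []).foldl
        (fun nxt2 e =>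
          PySem.List.pySetD nxt2 e.1
            (PySem.Int.mod (PySem.List.pyGetD nxt2 e.1 0 + mv.2 * e.2) 100000007))
        nxt)
    (List.replicate 512 0)

def compute_a_terms (num_terms : Int) (trans : List (List (Int × Int))) : List Int :=
  if num_terms ≤ 0 then []
  else
    let max_slices := 2 * (num_terms - 1)
    let dp0 := PySem.List.pySetD (List.replicate 512 (0 : Int)) 0 1
    ((PySem.List.pyRange 1 (max_slices + 1) 1).foldl
      (fun st n =>
        let dp := pvApply trans st.1
        (dp, if PySem.Int.mod n 2 == 0 then st.2 ++ [PySem.List.pyGetD dp 0 0] else st.2))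
      (dp0, [1])).2

-- ===== PORT B =====
def pvCompose (trans : List (List (Int × Int))) : List (List (Int × Int)) :=
  trans.foldl
    (fun acc edges =>
      acc ++ [(edges.foldl
        (fun comp e1 =>
          ((PySem.List.pyGet? trans e1.1).getD []).foldl
            (fun comp2 e2 =>
              comp2.insert e2.1
                (PySem.Int.mod (comp2.getD e2.1 0 + e1.2 * e2.2) 100000007))
            comp)
        (PySem.Dict.empty : PySem.Dict Int Int)).items])
    []

def compute_a_terms_alt (num_terms : Int) (trans : List (List (Int × Int))) : List Int :=
  if num_terms ≤ 0 then []
  else if num_terms == 1 then [1]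
  else
    let trans2 := pvCompose trans
    let dp0 := PySem.List.pySetD (List.replicate 512 (0 : Int)) 0 1
    ((PySem.List.pyRange 1 num_terms 1).foldl
      (fun st _ =>
        let dp := pvApply trans2 st.1
        (dp, st.2 ++ [PySem.List.pyGetD dp 0 0]))
      (dp0, [1])).2

-- ===== PRECONDITION & SPEC =====
-- Pre_ restricts to the natural domain of the DP — a nonempty transition table whose target
-- masks all lie in [0, min(len(trans), 512)), so every reachable mask has a row and fits the
-- 512-slot slice (plus the trans-independent cases num_terms ≤ 1): outside it A raises
-- IndexError or returns/raises depending on which masks happen to carry a nonzero value (and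
-- on negative-index wraparound), a reachability accident B's eager composition of all rows
-- cannot reproduce.
def Pre_compute_a_terms (num_terms : Int) (trans : List (List (Int × Int))) : Prop :=
  num_terms ≤ 1 ∨ (1 ≤ trans.length ∧
    ∀ row ∈ trans, ∀ e ∈ row, 0 ≤ e.1 ∧ e.1 < ((min trans.length 512 : ℕ) : Int))
instance (num_terms : Int) (trans : List (List (Int × Int))) : Decidable (Pre_compute_a_terms num_terms trans) := by unfold Pre_compute_a_terms; infer_instance
def pvWitness_compute_a_terms : Int × (List (List (Int × Int))) := (1, [])

def Spec_compute_a_terms (num_terms : Int) (trans : List (List (Int × Int))) (out : List Int) : Prop := out = compute_a_terms_alt num_terms trans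
instance (num_terms : Int) (trans : List (List (Int × Int))) (out : List Int) : Decidable (Spec_compute_a_terms num_terms trans out) := by unfold Spec_compute_a_terms; infer_instance

-- ===== CLAIM (what is proved, stated in full; the proofs are below) =====
def Claim_equal_compute_a_terms : Prop := ∀ (num_terms : Int) (trans : List (List (Int × Int))), Dom_compute_a_terms num_terms trans → Pre_compute_a_terms num_terms trans → Spec_compute_a_terms num_terms trans (compute_a_terms num_terms trans)

-- ===== LEMMAS AND PROOFS =====

-- Work in ZMod MOD: a dp slice is read as a vector, a transition table as a matrix.
abbrev pvZ : Type := ZMod 100000007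

def pvVec (l : List Int) (j : ℕ) : pvZ := ((l.getD j 0 : Int) : pvZ)
def pvRowS (row : List (Int × Int)) (j : Int) : pvZ :=
  (row.map (fun e => if e.1 = j then ((e.2 : Int) : pvZ) else 0)).sum
def pvMat (T : List (List (Int × Int))) (i : ℕ) (j : Int) : pvZ := pvRowS (T.getD i []) j
def pvGood (T : List (List (Int × Int))) : Prop :=
  ∀ row ∈ T, ∀ e ∈ row, 0 ≤ e.1 ∧ e.1 < ((min T.length 512 : ℕ) : Int)

-- bounds in a convenient form
theorem pvGood_bounds (T : List (List (Int × Int))) (hT : pvGood T)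
    (row : List (Int × Int)) (hrow : row ∈ T) (e : Int × Int) (he : e ∈ row) :
    0 ≤ e.1 ∧ e.1 < 512 ∧ e.1 < (T.length : Int) := by
  have h := hT row hrow e he
  have h1 : ((min T.length 512 : ℕ) : Int) ≤ (T.length : Int) :=
    Int.ofNat_le.mpr (Nat.min_le_left _ _)
  have h2 : ((min T.length 512 : ℕ) : Int) ≤ (512 : Int) :=
    Int.ofNat_le.mpr (Nat.min_le_right _ _)
  omega
def pvRed (l : List Int) : Prop := ∀ x ∈ l, 0 ≤ x ∧ x < 100000007

theorem pvCast_mod (a : Int) : ((PySem.Int.mod a 100000007 : Int) : pvZ) = (a : pvZ) := by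
  rw [PySem.Int.mod_eq_emod_of_pos (by norm_num : (0:Int) < 100000007)]
  exact_mod_cast ZMod.intCast_mod a 100000007

theorem pvInt_eq_of_cast_eq (a b : Int) (ha : 0 ≤ a) (ha2 : a < 100000007)
    (hb : 0 ≤ b) (hb2 : b < 100000007) (h : (a : pvZ) = (b : pvZ)) : a = b := by
  have := (ZMod.intCast_eq_intCast_iff' a b 100000007).mp h
  rw [Int.emod_eq_of_lt ha (by exact_mod_cast ha2), Int.emod_eq_of_lt hb (by exact_mod_cast hb2)] at this
  exact this

theorem pvRowS_cons (e : Int × Int) (row : List (Int × Int)) (j : Int) :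
    pvRowS (e :: row) j = (if e.1 = j then ((e.2 : Int) : pvZ) else 0) + pvRowS row j := by
  simp [pvRowS]

theorem pvRed_eq (a b : List Int) (ha : a.length = 512) (hb : b.length = 512)
    (hra : pvRed a) (hrb : pvRed b) (h : ∀ j : ℕ, j < 512 → pvVec a j = pvVec b j) : a = b := by
  apply List.ext_getElem (by omega)
  intro j hj _
  have hja : a.getD j 0 = a[j] := List.getD_eq_getElem a 0 hj
  have hjb : b.getD j 0 = b[j]'(by omega) := List.getD_eq_getElem b 0 (by omega)
  have hv := h j (by omega)
  rw [pvVec, pvVec, hja, hjb] at hv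
  have h1 := hra a[j] (List.getElem_mem hj)
  have h2 := hrb (b[j]'(by omega)) (List.getElem_mem (by omega))
  exact pvInt_eq_of_cast_eq _ _ h1.1 h1.2 h2.1 h2.2 hv

-- A-side: one row of edge pushes, as a vector update.
theorem pvRowFold (v : Int) : ∀ (row : List (Int × Int)), (∀ e ∈ row, 0 ≤ e.1 ∧ e.1 < 512) →
    ∀ (nxt : List Int), nxt.length = 512 → pvRed nxt →
    (row.foldl (fun nxt2 e => PySem.List.pySetD nxt2 e.1
        (PySem.Int.mod (PySem.List.pyGetD nxt2 e.1 0 + v * e.2) 100000007)) nxt).length = 512 ∧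
    pvRed (row.foldl (fun nxt2 e => PySem.List.pySetD nxt2 e.1
        (PySem.Int.mod (PySem.List.pyGetD nxt2 e.1 0 + v * e.2) 100000007)) nxt) ∧
    ∀ j : ℕ, j < 512 → pvVec (row.foldl (fun nxt2 e => PySem.List.pySetD nxt2 e.1
        (PySem.Int.mod (PySem.List.pyGetD nxt2 e.1 0 + v * e.2) 100000007)) nxt) j
      = pvVec nxt j + (v : pvZ) * pvRowS row (j : Int) := by
  intro row
  induction row with
  | nil =>
    intro _ nxt hlen hred
    refine ⟨hlen, hred, ?_⟩
    intro j hj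
    simp [pvRowS]
  | cons e row ih =>
    intro hb nxt hlen hred
    have he := hb e (List.mem_cons_self ..)
    have hrest : ∀ e' ∈ row, 0 ≤ e'.1 ∧ e'.1 < 512 := fun e' h' => hb e' (List.mem_cons_of_mem _ h')
    set w := PySem.Int.mod (PySem.List.pyGetD nxt e.1 0 + v * e.2) 100000007 with hw
    have hset : PySem.List.pySetD nxt e.1 w = nxt.set e.1.toNat w :=
      PySem.List.pySetD_of_nonneg nxt w he.1
    have hlen' : (nxt.set e.1.toNat w).length = 512 := by simp [hlen]
    have hred' : pvRed (nxt.set e.1.toNat w) := by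
      intro x hx
      rcases List.mem_or_eq_of_mem_set hx with h | h
      · exact hred x h
      · subst h
        exact ⟨PySem.Int.mod_nonneg _ (by norm_num), PySem.Int.mod_lt _ (by norm_num)⟩
    have hvec' : ∀ j : ℕ, j < 512 → pvVec (nxt.set e.1.toNat w) j
        = pvVec nxt j + (v : pvZ) * (if e.1 = (j : Int) then ((e.2 : Int) : pvZ) else 0) := by
      intro j hj
      have hjlen : j < nxt.length := by omega
      have h1 : (nxt.set e.1.toNat w).getD j 0 = (nxt.set e.1.toNat w)[j]'(by omega) :=
        List.getD_eq_getElem _ 0 (by omega)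
      rw [pvVec, h1, List.getElem_set]
      by_cases hc : e.1.toNat = j
      · have hcond : e.1 = (j : Int) := by omega
        have hget : PySem.List.pyGetD nxt e.1 0 = nxt[e.1.toNat]'(by omega) :=
          PySem.List.pyGetD_eq_getElem nxt 0 he.1 (by omega)
        rw [if_pos hc, if_pos hcond, hw, hget, pvCast_mod]
        push_cast
        rw [pvVec, List.getD_eq_getElem nxt 0 hjlen]
        simp only [hc]
      · have hcond : ¬ (e.1 = (j : Int)) := by omega
        simp only [if_neg hc, if_neg hcond, mul_zero, add_zero, pvVec,
          List.getD_eq_getElem nxt 0 hjlen]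
    have step := ih hrest (nxt.set e.1.toNat w) hlen' hred'
    rw [List.foldl_cons, hset]
    refine ⟨step.1, step.2.1, ?_⟩
    intro j hj
    rw [step.2.2 j hj, hvec' j hj, pvRowS_cons]
    ring

-- A-side: the whole enumerate loop, as vector times matrix.
theorem pvEnumFold (T : List (List (Int × Int))) (hT : pvGood T) :
    ∀ (dp : List Int) (s : ℕ) (nxt : List Int), s + dp.length = 512 →
    nxt.length = 512 → pvRed nxt →
    ((PySem.List.enumerate dp (s : Int)).foldl
      (fun nxt mv =>
        if mv.2 == 0 then nxt
        else ((PySem.List.pyGet? T mv.1).getD []).foldl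
          (fun nxt2 e => PySem.List.pySetD nxt2 e.1
            (PySem.Int.mod (PySem.List.pyGetD nxt2 e.1 0 + mv.2 * e.2) 100000007)) nxt) nxt).length = 512 ∧
    pvRed ((PySem.List.enumerate dp (s : Int)).foldl
      (fun nxt mv =>
        if mv.2 == 0 then nxt
        else ((PySem.List.pyGet? T mv.1).getD []).foldl
          (fun nxt2 e => PySem.List.pySetD nxt2 e.1
            (PySem.Int.mod (PySem.List.pyGetD nxt2 e.1 0 + mv.2 * e.2) 100000007)) nxt) nxt) ∧
    ∀ j : ℕ, j < 512 → pvVec ((PySem.List.enumerate dp (s : Int)).foldl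
      (fun nxt mv =>
        if mv.2 == 0 then nxt
        else ((PySem.List.pyGet? T mv.1).getD []).foldl
          (fun nxt2 e => PySem.List.pySetD nxt2 e.1
            (PySem.Int.mod (PySem.List.pyGetD nxt2 e.1 0 + mv.2 * e.2) 100000007)) nxt) nxt) j
      = pvVec nxt j + ∑ k ∈ Finset.range dp.length, pvVec dp k * pvMat T (s + k) (j : Int) := by
  intro dp
  induction dp with
  | nil =>
    intro s nxt hs hlen hred
    refine ⟨by simp [PySem.List.enumerate_nil, hlen], by simpa [PySem.List.enumerate_nil] using hred, ?_⟩
    intro j hj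
    simp [PySem.List.enumerate_nil]
  | cons d dp ih =>
    intro s nxt hs hlen hred
    rw [PySem.List.enumerate_cons, List.foldl_cons]
    have hcast : ((s : Int) + 1) = (((s + 1 : ℕ)) : Int) := by push_cast; ring
    by_cases hd : d = 0
    · rw [if_pos (by simpa using hd), hcast]
      have H := ih (s + 1) nxt (by simp at hs; omega) hlen hred
      refine ⟨H.1, H.2.1, ?_⟩
      intro j hj
      rw [H.2.2 j hj]
      congr 1
      rw [List.length_cons, Finset.sum_range_succ']
      have h0 : pvVec (d :: dp) 0 * pvMat T (s + 0) (j : Int) = 0 := by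
        simp [pvVec, hd]
      rw [h0, add_zero]
      apply Finset.sum_congr rfl
      intro k _
      have hv : pvVec (d :: dp) (k + 1) = pvVec dp k := by simp [pvVec]
      rw [hv, show s + 1 + k = s + (k + 1) by omega]
    · rw [if_neg (by simpa using hd)]
      have hs512 : s < 512 := by simp at hs; omega
      obtain ⟨hb, hmat⟩ :
          (∀ e ∈ (PySem.List.pyGet? T ((s : Int), d).1).getD [], 0 ≤ e.1 ∧ e.1 < 512)
          ∧ ∀ j : ℕ, pvRowS ((PySem.List.pyGet? T ((s : Int), d).1).getD []) (j : Int)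
              = pvMat T s (j : Int) := by
        by_cases hsT : s < T.length
        · have hrow : (PySem.List.pyGet? T ((s : Int), d).1).getD [] = T[s] := by
            simp [PySem.List.pyGet?_natCast, List.getElem?_eq_getElem hsT]
          rw [hrow]
          refine ⟨fun e he => ?_, fun j => ?_⟩
          · have h := pvGood_bounds T hT _ (List.getElem_mem hsT) e he
            exact ⟨h.1, h.2.1⟩
          · rw [pvMat, List.getD_eq_getElem T [] hsT]
        · have hrow : (PySem.List.pyGet? T ((s : Int), d).1).getD [] = [] := by
            simp only [PySem.List.pyGet?_natCast]
            rw [List.getElem?_eq_none (by omega)]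
            rfl
          rw [hrow]
          refine ⟨fun e he => absurd he (List.not_mem_nil), fun j => ?_⟩
          rw [pvMat, List.getD_eq_default _ _ (by omega)]
      have R := pvRowFold d _ hb nxt hlen hred
      rw [hcast]
      have H := ih (s + 1) _ (by simp at hs; omega) R.1 R.2.1
      refine ⟨H.1, H.2.1, ?_⟩
      intro j hj
      rw [H.2.2 j hj, R.2.2 j hj]
      rw [hmat j, List.length_cons, Finset.sum_range_succ']
      have h0 : pvVec (d :: dp) 0 * pvMat T (s + 0) (j : Int) = (d : pvZ) * pvMat T s (j : Int) := by
        simp [pvVec]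
      rw [h0]
      have hsum : ∑ k ∈ Finset.range dp.length, pvVec (d :: dp) (k + 1) * pvMat T (s + (k + 1)) (j : Int)
          = ∑ k ∈ Finset.range dp.length, pvVec dp k * pvMat T (s + 1 + k) (j : Int) := by
        apply Finset.sum_congr rfl
        intro k _
        have hv : pvVec (d :: dp) (k + 1) = pvVec dp k := by simp [pvVec]
        rw [hv, show s + (k + 1) = s + 1 + k by omega]
      rw [hsum]
      ring

theorem pvApply_spec (T : List (List (Int × Int))) (hT : pvGood T)
    (dp : List Int) (hdp : dp.length = 512) :
    (pvApply T dp).length = 512 ∧ pvRed (pvApply T dp) ∧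
    ∀ j : ℕ, j < 512 → pvVec (pvApply T dp) j
      = ∑ k ∈ Finset.range 512, pvVec dp k * pvMat T k (j : Int) := by
  have hz : pvRed (List.replicate 512 (0 : Int)) := by
    intro x hx
    have := List.eq_of_mem_replicate hx
    omega
  have H := pvEnumFold T hT dp 0 (List.replicate 512 0) (by omega) (by rw [List.length_replicate]) hz
  have hE : PySem.List.enumerate dp ((0 : ℕ) : Int) = PySem.List.enumerate dp 0 := by norm_num
  rw [hE] at H
  refine ⟨H.1, H.2.1, ?_⟩
  intro j hj
  have := H.2.2 j hj
  rw [pvApply, this, hdp]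
  have h0 : pvVec (List.replicate 512 (0 : Int)) j = 0 := by
    rw [pvVec, List.getD_eq_getElem _ 0 (by rw [List.length_replicate]; omega),
      List.getElem_replicate]
    norm_num
  rw [h0, zero_add]
  apply Finset.sum_congr rfl
  intro k _
  rw [Nat.zero_add]

-- B-side: the dict-composition read back as matrix entries.
theorem pvDictInner (c1 : Int) : ∀ (l2 : List (Int × Int)) (d : PySem.Dict Int Int) (j : Int),
    (((l2.foldl (fun comp2 e2 => comp2.insert e2.1
        (PySem.Int.mod (comp2.getD e2.1 0 + c1 * e2.2) 100000007)) d).getD j 0 : Int) : pvZ)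
      = ((d.getD j 0 : Int) : pvZ) + (c1 : pvZ) * pvRowS l2 j := by
  intro l2
  induction l2 with
  | nil => intro d j; simp [pvRowS]
  | cons e l2 ih =>
    intro d j
    rw [List.foldl_cons, ih, pvRowS_cons]
    have hins : (d.insert e.1 (PySem.Int.mod (d.getD e.1 0 + c1 * e.2) 100000007)).getD j 0
        = if j = e.1 then PySem.Int.mod (d.getD e.1 0 + c1 * e.2) 100000007 else d.getD j 0 :=
      PySem.Dict.getD_insert d e.1 j _ 0
    rw [hins]
    by_cases hc : j = e.1
    · rw [if_pos hc, if_pos hc.symm, pvCast_mod, hc]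
      push_cast
      ring
    · rw [if_neg hc, if_neg (fun h => hc h.symm)]
      ring

def pvDictRow (T : List (List (Int × Int))) (comp : PySem.Dict Int Int) (e1 : Int × Int) :
    PySem.Dict Int Int :=
  ((PySem.List.pyGet? T e1.1).getD []).foldl
    (fun comp2 e2 => comp2.insert e2.1
      (PySem.Int.mod (comp2.getD e2.1 0 + e1.2 * e2.2) 100000007)) comp

theorem pvDictOuter (T : List (List (Int × Int))) : ∀ (row : List (Int × Int)) (d : PySem.Dict Int Int) (j : Int),
    (((row.foldl (pvDictRow T) d).getD j 0 : Int) : pvZ)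
      = ((d.getD j 0 : Int) : pvZ)
        + (row.map (fun e1 => ((e1.2 : Int) : pvZ) * pvRowS ((PySem.List.pyGet? T e1.1).getD []) j)).sum := by
  intro row
  induction row with
  | nil => intro d j; simp
  | cons e1 row ih =>
    intro d j
    rw [List.foldl_cons, ih, pvDictRow, pvDictInner]
    rw [List.map_cons, List.sum_cons]
    ring

theorem pvDictNodup (T : List (List (Int × Int))) : ∀ (row : List (Int × Int)) (d : PySem.Dict Int Int),
    d.keys.Nodup → (row.foldl (pvDictRow T) d).keys.Nodup := by
  intro row
  induction row with
  | nil => intro d h; exact h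
  | cons e1 row ih =>
    intro d h
    rw [List.foldl_cons]
    exact ih _ (PySem.Dict.nodup_keys_foldl_insert_key _ Prod.fst _ d h)

theorem pvDictKeysInner (c1 : Int) : ∀ (l2 : List (Int × Int)) (d : PySem.Dict Int Int) (j : Int),
    j ∈ (l2.foldl (fun comp2 e2 => comp2.insert e2.1
        (PySem.Int.mod (comp2.getD e2.1 0 + c1 * e2.2) 100000007)) d).keys →
    j ∈ d.keys ∨ ∃ e2 ∈ l2, j = e2.1 := by
  intro l2
  induction l2 with
  | nil => intro d j h; exact Or.inl h
  | cons e l2 ih =>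
    intro d j h
    rw [List.foldl_cons] at h
    rcases ih _ j h with h' | h'
    · rcases (PySem.Dict.mem_keys_insert d e.1 j _).mp h' with h'' | h''
      · exact Or.inr ⟨e, List.mem_cons_self .., h''⟩
      · exact Or.inl h''
    · rcases h' with ⟨e2, he2, hj⟩
      exact Or.inr ⟨e2, List.mem_cons_of_mem _ he2, hj⟩

theorem pvDictKeysOuter (T : List (List (Int × Int))) : ∀ (row : List (Int × Int)) (d : PySem.Dict Int Int) (j : Int),
    j ∈ (row.foldl (pvDictRow T) d).keys →
    j ∈ d.keys ∨ ∃ e1 ∈ row, ∃ e2 ∈ (PySem.List.pyGet? T e1.1).getD [], j = e2.1 := by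
  intro row
  induction row with
  | nil => intro d j h; exact Or.inl h
  | cons e1 row ih =>
    intro d j h
    rw [List.foldl_cons] at h
    rcases ih _ j h with h' | h'
    · rcases pvDictKeysInner e1.2 _ d j h' with h'' | h''
      · exact Or.inl h''
      · rcases h'' with ⟨e2, he2, hj⟩
        exact Or.inr ⟨e1, List.mem_cons_self .., e2, he2, hj⟩
    · rcases h' with ⟨f1, hf1, f2, hf2, hj⟩
      exact Or.inr ⟨f1, List.mem_cons_of_mem _ hf1, f2, hf2, hj⟩

theorem pvRowS_eq_zero (l : List (Int × Int)) (j : Int) (h : ∀ e ∈ l, e.1 ≠ j) :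
    pvRowS l j = 0 := by
  rw [pvRowS]
  apply List.sum_eq_zero
  intro x hx
  rcases List.mem_map.mp hx with ⟨e, he, hex⟩
  rw [← hex, if_neg (h e he)]

theorem pvRowS_of_nodup_keys : ∀ (l : List (Int × Int)), (l.map Prod.fst).Nodup → ∀ (j : Int),
    pvRowS l j = (((PySem.Dict.mk l).getD j 0 : Int) : pvZ) := by
  intro l
  induction l with
  | nil =>
    intro _ j
    have : (PySem.Dict.mk ([] : List (Int × Int))).getD j 0 = 0 := rfl
    rw [this, pvRowS]
    simp
  | cons e l ih =>
    intro hnd j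
    have hnd' : (l.map Prod.fst).Nodup := (List.nodup_cons.mp hnd).2
    have hnotin : e.1 ∉ l.map Prod.fst := (List.nodup_cons.mp hnd).1
    have hmk : (PySem.Dict.mk (e :: l)).getD j 0
        = if e.1 == j then e.2 else (PySem.Dict.mk l).getD j 0 := by
      rw [PySem.Dict.getD_eq_get?_getD, PySem.Dict.getD_eq_get?_getD]
      have : (PySem.Dict.mk ((e.1, e.2) :: l)).get? j
          = if e.1 == j then some e.2 else (PySem.Dict.mk l).get? j := PySem.Dict.get?_mk_cons e.1 e.2 l j
      rw [show (e :: l) = ((e.1, e.2) :: l) by rw [Prod.mk.eta], this]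
      split <;> rfl
    rw [hmk, pvRowS_cons]
    by_cases hc : e.1 = j
    · rw [if_pos hc, if_pos (by simpa using hc)]
      have hz : pvRowS l j = 0 := by
        apply pvRowS_eq_zero
        intro f hf hfj
        exact hnotin (hc ▸ hfj ▸ List.mem_map_of_mem hf)
      rw [hz]
      ring
    · rw [if_neg hc, if_neg (by simpa using hc), ih hnd' j]
      ring

theorem pvCompose_eq (T : List (List (Int × Int))) :
    pvCompose T = T.map (fun edges =>
      (edges.foldl (pvDictRow T) (PySem.Dict.empty : PySem.Dict Int Int)).items) := by
  have h : pvCompose T = T.foldl (fun acc edges => acc ++ [(fun edges =>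
      (edges.foldl (pvDictRow T) (PySem.Dict.empty : PySem.Dict Int Int)).items) edges]) [] := rfl
  rw [h, PySem.List.foldl_append_singleton_eq_map, List.nil_append]

theorem pvGroup (g : Int → pvZ) : ∀ (row : List (Int × Int)), (∀ e ∈ row, 0 ≤ e.1 ∧ e.1 < 512) →
    (row.map (fun e1 => ((e1.2 : Int) : pvZ) * g e1.1)).sum
      = ∑ i ∈ Finset.range 512, pvRowS row (i : Int) * g (i : Int) := by
  intro row
  induction row with
  | nil =>
    intro _
    simp [pvRowS]
  | cons e row ih =>
    intro hb
    have he := hb e (List.mem_cons_self ..)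
    rw [List.map_cons, List.sum_cons, ih (fun f hf => hb f (List.mem_cons_of_mem _ hf))]
    have hsplit : ∀ i : ℕ, pvRowS (e :: row) (i : Int) * g (i : Int)
        = (if i = e.1.toNat then ((e.2 : Int) : pvZ) * g (i : Int) else 0)
          + pvRowS row (i : Int) * g (i : Int) := by
      intro i
      rw [pvRowS_cons, add_mul]
      congr 1
      by_cases hc : i = e.1.toNat
      · rw [if_pos (by omega : e.1 = (i : Int)), if_pos hc]
      · rw [if_neg (by omega : ¬ e.1 = (i : Int)), if_neg hc, zero_mul]
    rw [Finset.sum_congr rfl (fun i _ => hsplit i), Finset.sum_add_distrib]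
    rw [Finset.sum_ite_eq' (Finset.range 512) e.1.toNat (fun i => ((e.2 : Int) : pvZ) * g (i : Int))]
    rw [if_pos (Finset.mem_range.mpr (by omega))]
    rw [show ((e.1.toNat : ℕ) : Int) = e.1 from Int.toNat_of_nonneg he.1]

theorem pvGood_compose (T : List (List (Int × Int))) (hT : pvGood T) : pvGood (pvCompose T) := by
  rw [pvCompose_eq]
  intro row' hrow' e he
  rw [List.length_map]
  rcases List.mem_map.mp hrow' with ⟨row, hrow, hfr⟩
  have hkey : e.1 ∈ (row.foldl (pvDictRow T) (PySem.Dict.empty : PySem.Dict Int Int)).keys := by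
    rw [← hfr] at he
    exact PySem.Dict.mem_keys_of_mem_items _ he
  rcases pvDictKeysOuter T row _ e.1 hkey with h | h
  · rw [PySem.Dict.keys_empty] at h
    exact absurd h (List.not_mem_nil)
  · rcases h with ⟨e1, he1, e2, he2, hje⟩
    have hb1 := pvGood_bounds T hT row hrow e1 he1
    have hlt : e1.1.toNat < T.length := by omega
    have hget : PySem.List.pyGet? T e1.1 = some (T[e1.1.toNat]'hlt) := by
      rw [PySem.List.pyGet?_of_nonneg T hb1.1]
      exact List.getElem?_eq_getElem hlt
    rw [hget] at he2
    have hb2 := hT _ (List.getElem_mem hlt) e2 he2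
    rw [hje]
    exact hb2

theorem pvMat_compose (T : List (List (Int × Int))) (hT : pvGood T) (m : ℕ) (_hm : m < 512) (j : Int) :
    pvMat (pvCompose T) m j = ∑ i ∈ Finset.range 512, pvMat T m (i : Int) * pvMat T i j := by
  have hz : ∀ j' : Int, pvRowS ([] : List (Int × Int)) j' = 0 := by intro j'; simp [pvRowS]
  by_cases hmT : m < T.length
  · have hrowmem : T[m] ∈ T := List.getElem_mem hmT
    have hgd : (pvCompose T).getD m []
        = ((T[m]).foldl (pvDictRow T) (PySem.Dict.empty : PySem.Dict Int Int)).items := by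
      rw [pvCompose_eq, List.getD_eq_getElem _ [] (by rw [List.length_map]; omega), List.getElem_map]
    rw [pvMat, hgd]
    have hnd : ((T[m]).foldl (pvDictRow T) (PySem.Dict.empty : PySem.Dict Int Int)).keys.Nodup :=
      pvDictNodup T _ _ (by rw [PySem.Dict.keys_empty]; exact List.nodup_nil)
    have hndm : ((((T[m]).foldl (pvDictRow T) (PySem.Dict.empty : PySem.Dict Int Int)).items).map Prod.fst).Nodup := hnd
    rw [pvRowS_of_nodup_keys _ hndm j]
    have hmk : PySem.Dict.mk (((T[m]).foldl (pvDictRow T) (PySem.Dict.empty : PySem.Dict Int Int)).items)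
        = (T[m]).foldl (pvDictRow T) (PySem.Dict.empty : PySem.Dict Int Int) := rfl
    rw [hmk, pvDictOuter T (T[m]) _ j]
    have hemp : (((PySem.Dict.empty : PySem.Dict Int Int).getD j 0 : Int) : pvZ) = 0 := by
      norm_num [PySem.Dict.getD_empty]
    rw [hemp, zero_add]
    have hb : ∀ e ∈ T[m], 0 ≤ e.1 ∧ e.1 < 512 := by
      intro e he
      have h := pvGood_bounds T hT _ hrowmem e he
      exact ⟨h.1, h.2.1⟩
    rw [pvGroup (fun t => pvRowS ((PySem.List.pyGet? T t).getD []) j) (T[m]) hb]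
    apply Finset.sum_congr rfl
    intro i _
    have h1 : pvRowS (T[m]) (i : Int) = pvMat T m (i : Int) := by
      rw [pvMat, List.getD_eq_getElem T [] hmT]
    have h2 : (PySem.List.pyGet? T ((i : ℕ) : Int)).getD [] = T.getD i [] := by
      by_cases hiT : i < T.length
      · rw [PySem.List.pyGet?_natCast, List.getElem?_eq_getElem hiT, Option.getD_some,
          List.getD_eq_getElem T [] hiT]
      · rw [PySem.List.pyGet?_natCast, List.getElem?_eq_none (by omega),
          List.getD_eq_default _ _ (by omega)]
        rfl
    rw [h1, h2]
    rfl
  · have hcl : (pvCompose T).length = T.length := by rw [pvCompose_eq, List.length_map]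
    rw [pvMat, List.getD_eq_default _ _ (by omega : (pvCompose T).length ≤ m), hz]
    symm
    apply Finset.sum_eq_zero
    intro i _
    rw [pvMat, List.getD_eq_default _ _ (by omega : T.length ≤ m), hz, zero_mul]

theorem pvDoubleStep (T : List (List (Int × Int))) (hT : pvGood T)
    (dp : List Int) (hdp : dp.length = 512) :
    pvApply (pvCompose T) dp = pvApply T (pvApply T dp) := by
  have hC := pvGood_compose T hT
  have HB := pvApply_spec (pvCompose T) hC dp hdp
  have H1 := pvApply_spec T hT dp hdp
  have H2 := pvApply_spec T hT (pvApply T dp) H1.1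
  apply pvRed_eq _ _ HB.1 H2.1 HB.2.1 H2.2.1
  intro j hj
  rw [HB.2.2 j hj, H2.2.2 j hj]
  calc ∑ k ∈ Finset.range 512, pvVec dp k * pvMat (pvCompose T) k (j : Int)
      = ∑ k ∈ Finset.range 512, pvVec dp k * ∑ i ∈ Finset.range 512, pvMat T k (i : Int) * pvMat T i (j : Int) := by
        apply Finset.sum_congr rfl
        intro k hk
        rw [pvMat_compose T hT k (Finset.mem_range.mp hk) (j : Int)]
    _ = ∑ i ∈ Finset.range 512, (∑ k ∈ Finset.range 512, pvVec dp k * pvMat T k (i : Int)) * pvMat T i (j : Int) := by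
        rw [Finset.sum_congr rfl (fun k _ => Finset.mul_sum (Finset.range 512)
          (fun i => pvMat T k (i : Int) * pvMat T i (j : Int)) (pvVec dp k))]
        rw [Finset.sum_comm]
        apply Finset.sum_congr rfl
        intro i _
        rw [Finset.sum_mul]
        apply Finset.sum_congr rfl
        intro k _
        ring
    _ = ∑ i ∈ Finset.range 512, pvVec (pvApply T dp) i * pvMat T i (j : Int) := by
        apply Finset.sum_congr rfl
        intro i hi
        rw [H1.2.2 i (Finset.mem_range.mp hi)]

def pvDp0 : List Int := PySem.List.pySetD (List.replicate 512 (0 : Int)) 0 1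

theorem pvDp0_facts : pvDp0.length = 512 ∧ pvRed pvDp0 := by
  have h : pvDp0 = (List.replicate 512 (0 : Int)).set 0 1 :=
    PySem.List.pySetD_of_nonneg _ 1 (by norm_num)
  rw [h]
  constructor
  · rw [List.length_set, List.length_replicate]
  · intro x hx
    rcases List.mem_or_eq_of_mem_set hx with h' | h'
    · have := List.eq_of_mem_replicate h'
      omega
    · omega

-- The two loop bodies of the ports, named so the loop lemma can speak about them.
def pvFA (trans : List (List (Int × Int))) : (List Int × List Int) → Int → (List Int × List Int) :=
  fun st n =>
    let dp := pvApply trans st.1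
    (dp, if PySem.Int.mod n 2 == 0 then st.2 ++ [PySem.List.pyGetD dp 0 0] else st.2)

def pvFB (trans2 : List (List (Int × Int))) : (List Int × List Int) → Int → (List Int × List Int) :=
  fun st _ =>
    let dp := pvApply trans2 st.1
    (dp, st.2 ++ [PySem.List.pyGetD dp 0 0])

set_option maxRecDepth 4096 in
theorem pvLoop (trans : List (List (Int × Int))) (hT : pvGood trans) : ∀ (m : ℕ),
    ((PySem.List.pyRange 1 (2 * (m : Int) + 1) 1).foldl (pvFA trans) (pvDp0, [1]))
      = ((PySem.List.pyRange 1 ((m : Int) + 1) 1).foldl (pvFB (pvCompose trans)) (pvDp0, [1]))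
    ∧ ((PySem.List.pyRange 1 (2 * (m : Int) + 1) 1).foldl (pvFA trans) (pvDp0, [1])).1.length = 512
    ∧ pvRed ((PySem.List.pyRange 1 (2 * (m : Int) + 1) 1).foldl (pvFA trans) (pvDp0, [1])).1 := by
  intro m
  induction m with
  | zero =>
    have h1 : PySem.List.pyRange 1 (2 * ((0 : ℕ) : Int) + 1) 1 = [] := by
      rw [show (2 * ((0 : ℕ) : Int) + 1) = 1 by norm_num]
      exact PySem.List.pyRange_one_eq_nil le_rfl
    have h2 : PySem.List.pyRange 1 (((0 : ℕ) : Int) + 1) 1 = [] := by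
      rw [show (((0 : ℕ) : Int) + 1) = 1 by norm_num]
      exact PySem.List.pyRange_one_eq_nil le_rfl
    rw [h1, h2]
    exact ⟨rfl, pvDp0_facts.1, pvDp0_facts.2⟩
  | succ m ih =>
    obtain ⟨hEq, hLen, hRed⟩ := ih
    have hA : PySem.List.pyRange 1 (2 * (((m + 1) : ℕ) : Int) + 1) 1
        = PySem.List.pyRange 1 (2 * (m : Int) + 1) 1 ++ [2 * (m : Int) + 1] ++ [2 * (m : Int) + 2] := by
      rw [show (2 * (((m + 1) : ℕ) : Int) + 1) = (2 * (m : Int) + 2) + 1 by push_cast; ring]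
      rw [PySem.List.pyRange_one_succ_right (by omega : (1 : Int) ≤ 2 * (m : Int) + 2)]
      rw [show (2 * (m : Int) + 2) = (2 * (m : Int) + 1) + 1 by ring]
      rw [PySem.List.pyRange_one_succ_right (by omega : (1 : Int) ≤ 2 * (m : Int) + 1)]
    have hB : PySem.List.pyRange 1 ((((m + 1) : ℕ) : Int) + 1) 1
        = PySem.List.pyRange 1 ((m : Int) + 1) 1 ++ [(m : Int) + 1] := by
      rw [show ((((m + 1) : ℕ) : Int) + 1) = ((m : Int) + 1) + 1 by push_cast; ring]
      exact PySem.List.pyRange_one_succ_right (by omega)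
    rw [hA, hB, List.foldl_append, List.foldl_append, List.foldl_append]
    rw [← hEq]
    set S := (PySem.List.pyRange 1 (2 * (m : Int) + 1) 1).foldl (pvFA trans) (pvDp0, [1]) with hS
    have hodd : PySem.Int.mod (2 * (m : Int) + 1) 2 = 1 := by
      rw [PySem.Int.mod_eq_emod_of_pos (by norm_num : (0 : Int) < 2)]
      omega
    have heven : PySem.Int.mod (2 * (m : Int) + 2) 2 = 0 := by
      rw [PySem.Int.mod_eq_emod_of_pos (by norm_num : (0 : Int) < 2)]
      omega
    have hstep1 : List.foldl (pvFA trans) S [2 * (m : Int) + 1] = (pvApply trans S.1, S.2) := by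
      rw [List.foldl_cons, List.foldl_nil, pvFA]
      simp only [hodd]
      norm_num
    have hstep2 : List.foldl (pvFA trans) (pvApply trans S.1, S.2) [2 * (m : Int) + 2]
        = (pvApply trans (pvApply trans S.1),
           S.2 ++ [PySem.List.pyGetD (pvApply trans (pvApply trans S.1)) 0 0]) := by
      rw [List.foldl_cons, List.foldl_nil, pvFA]
      simp only [heven]
      norm_num
    have hstepB : List.foldl (pvFB (pvCompose trans)) S [(m : Int) + 1]
        = (pvApply (pvCompose trans) S.1,
           S.2 ++ [PySem.List.pyGetD (pvApply (pvCompose trans) S.1) 0 0]) := by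
      rw [List.foldl_cons, List.foldl_nil, pvFB]
    have hDS : pvApply (pvCompose trans) S.1 = pvApply trans (pvApply trans S.1) :=
      pvDoubleStep trans hT S.1 hLen
    have hspec1 := pvApply_spec trans hT S.1 hLen
    have hspec2 := pvApply_spec trans hT (pvApply trans S.1) hspec1.1
    rw [hstep1, hstep2, hstepB, hDS]
    exact ⟨rfl, hspec2.1, hspec2.2.1⟩

theorem pvGood_of_pre (num_terms : Int) (trans : List (List (Int × Int)))
    (h : Pre_compute_a_terms num_terms trans) (h2 : ¬ num_terms ≤ 1) : pvGood trans := by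
  rcases h with h | h
  · omega
  · exact h.2

theorem compute_a_terms_spec : Claim_equal_compute_a_terms := by
  intro num_terms trans _ hPre
  unfold Spec_compute_a_terms
  by_cases h0 : num_terms ≤ 0
  · rw [compute_a_terms, compute_a_terms_alt, if_pos h0, if_pos h0]
  · by_cases h1 : num_terms = 1
    · subst h1
      rw [compute_a_terms, compute_a_terms_alt, if_neg h0, if_neg h0, if_pos (by norm_num)]
      have hr : PySem.List.pyRange 1 (2 * ((1 : Int) - 1) + 1) 1 = [] := by
        rw [show (2 * ((1 : Int) - 1) + 1) = 1 by ring]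
        exact PySem.List.pyRange_one_eq_nil le_rfl
      simp only [hr, List.foldl_nil]
    · have hgt : ¬ num_terms ≤ 1 := by omega
      have hT : pvGood trans := pvGood_of_pre num_terms trans hPre hgt
      obtain ⟨m, hm⟩ : ∃ m : ℕ, num_terms = (m : Int) + 1 := ⟨(num_terms - 1).toNat, by omega⟩
      have hAeq : compute_a_terms num_terms trans
          = ((PySem.List.pyRange 1 (2 * (num_terms - 1) + 1) 1).foldl (pvFA trans) (pvDp0, [1])).2 := by
        rw [compute_a_terms, if_neg h0]
        rfl
      have hBeq : compute_a_terms_alt num_terms trans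
          = ((PySem.List.pyRange 1 num_terms 1).foldl (pvFB (pvCompose trans)) (pvDp0, [1])).2 := by
        rw [compute_a_terms_alt, if_neg h0, if_neg (by simpa using h1)]
        rfl
      rw [hAeq, hBeq, show (2 * (num_terms - 1) + 1) = 2 * (m : Int) + 1 by omega,
        show num_terms = (m : Int) + 1 from hm, (pvLoop trans hT m).1]
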